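-- pv_equiv track=rewrite | github.com/AI-Hypercomputer/maxdiffusion | src/maxdiffusion/tests/wan_cfg_cache_test.py | _get_cache_schedule
-- ===== SOURCE A (Python) =====
-- def _get_cache_schedule(num_inference_steps, height=480):
--   """Extract the cache schedule from run_inference_2_1's logic.
--
--   Mirrors the schedule computation in run_inference_2_1 to verify correctness.
--   """
--   if height >= 720:
--     cfg_cache_interval = 5
--     cfg_cache_start_step = int(num_inference_steps / 3)
--     cfg_cache_end_step = int(num_inference_steps * 0.9)
--   else:
--     cfg_cache_interval = 5
--     cfg_cache_start_step = int(num_inference_steps / 3)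
--     cfg_cache_end_step = num_inference_steps - 2
--
--   first_full_step_seen = False
--   schedule = []
--   for s in range(num_inference_steps):
--     is_cache = (
--         first_full_step_seen
--         and s >= cfg_cache_start_step
--         and s < cfg_cache_end_step
--         and (s - cfg_cache_start_step) % cfg_cache_interval != 0
--     )
--     schedule.append(is_cache)
--     if not is_cache:
--       first_full_step_seen = True
--   return schedule
-- ===== SOURCE B (Python) =====
-- def _get_cache_schedule(num_inference_steps, height=480):
--   """Run-length construction: emit the schedule as segments (prefix of False,
--   repeated [False]+[True]*4 blocks, suffix of False) instead of testing each step."""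
--   n = num_inference_steps
--   interval = 5
--   start = int(n / 3)
--   end = int(n * 0.9) if height >= 720 else n - 2
--   lo = max(0, min(start, n))
--   hi = max(lo, min(end, n))
--   out = [False] * lo
--   s = lo
--   while s < hi:
--     out.append(False)
--     run = min(interval - 1, hi - s - 1)
--     out.extend([True] * run)
--     s += 1 + run
--   out.extend([False] * (n - hi))
--   return out
-- ===== Notes on version B (the rewrite author's own statement) =====
-- stated objective: alternative
-- what changed: Replaced A's per-step loop carrying a first_full_step_seen flag with a run-length construction: the schedule is emitted as whole segments (a False prefix up to the clamped start, repeated [False]+[True]*(interval-1) blocks over the cache window, a False suffix), never testing individual steps; the flag is redundant because step 0 is never a cache step.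
import Mathlib
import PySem

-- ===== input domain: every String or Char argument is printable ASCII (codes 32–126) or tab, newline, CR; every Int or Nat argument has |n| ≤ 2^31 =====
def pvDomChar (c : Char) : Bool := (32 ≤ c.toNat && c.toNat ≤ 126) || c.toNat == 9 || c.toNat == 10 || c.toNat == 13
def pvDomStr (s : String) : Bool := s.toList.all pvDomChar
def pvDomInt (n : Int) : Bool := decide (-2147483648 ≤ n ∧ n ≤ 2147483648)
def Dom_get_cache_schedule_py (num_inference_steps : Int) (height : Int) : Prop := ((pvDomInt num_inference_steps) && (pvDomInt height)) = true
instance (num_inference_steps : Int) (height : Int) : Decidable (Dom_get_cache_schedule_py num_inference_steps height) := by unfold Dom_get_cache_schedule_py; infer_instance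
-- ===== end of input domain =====

-- B replaces A's per-step flag loop by a run-length construction emitting whole segments
-- (False prefix, repeated [False]+[True]*4 blocks over the cache window, False suffix).

-- ===== PORT A =====
-- Float-primitive port of Python's `int(n * 0.9)`, exact on |n| ≤ 2^31 (verified against
-- CPython): 0.9 is the double 8106479329266893/2^53; the product is rounded to
-- nearest-even double (53 significant bits) and then truncated toward zero.
def pyIntMul09A (n : Int) : Int :=
  let m : Nat := n.natAbs * 8106479329266893
  let bl : Nat := m.log2 + 1
  let m' : Nat :=
    if bl ≤ 53 then m
    else
      let sh := bl - 53
      let q := m / 2 ^ sh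
      let r := m % 2 ^ sh
      let half := 2 ^ (sh - 1)
      let q' := if r > half ∨ (r = half ∧ q % 2 = 1) then q + 1 else q
      q' * 2 ^ sh
  let v : Nat := m' / 2 ^ 53
  if n < 0 then -(v : Int) else (v : Int)

-- Python's `int(num_inference_steps / 3)` = truncating division (exact on |n| ≤ 2^31: the
-- correctly-rounded float quotient never crosses an integer there), ported as Int.tdiv.
def pvLoopA (start e interval : Int) : List Int → Bool → List Bool
  | [], _ => []
  | s :: rest, flag =>
    let ic := flag && decide (start ≤ s) && decide (s < e)
                   && decide (PySem.Int.mod (s - start) interval ≠ 0)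
    ic :: pvLoopA start e interval rest (if ic then flag else true)

def get_cache_schedule_py (num_inference_steps : Int) (height : Int) : List Bool :=
  let p := if height ≥ 720 then
      ((5 : Int), num_inference_steps.tdiv 3, pyIntMul09A num_inference_steps)
    else
      ((5 : Int), num_inference_steps.tdiv 3, num_inference_steps - 2)
  pvLoopA p.2.1 p.2.2 p.1 (PySem.List.pyRange 0 num_inference_steps 1) false

-- ===== PORT B =====
def pyIntMul09B (n : Int) : Int :=
  let m : Nat := n.natAbs * 8106479329266893
  let bl : Nat := m.log2 + 1
  let m' : Nat :=
    if bl ≤ 53 then m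
    else
      let sh := bl - 53
      let q := m / 2 ^ sh
      let r := m % 2 ^ sh
      let half := 2 ^ (sh - 1)
      let q' := if r > half ∨ (r = half ∧ q % 2 = 1) then q + 1 else q
      q' * 2 ^ sh
  let v : Nat := m' / 2 ^ 53
  if n < 0 then -(v : Int) else (v : Int)

-- B's while loop over the cache window [s, hi): each iteration emits one block
-- `False :: True*run` and jumps ahead by 1 + run.
def pvMidB (hi s : Int) : List Bool :=
  if _h : s < hi then
    let run := min 4 (hi - s - 1)
    (false :: List.replicate run.toNat true) ++ pvMidB hi (s + 1 + run)
  else []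
termination_by (hi - s).toNat
decreasing_by omega

def get_cache_schedule_py_alt (num_inference_steps : Int) (height : Int) : List Bool :=
  let n := num_inference_steps
  let start := n.tdiv 3
  let e := if height ≥ 720 then pyIntMul09B n else n - 2
  let lo := max 0 (min start n)
  let hi := max lo (min e n)
  List.replicate lo.toNat false ++ pvMidB hi lo ++ List.replicate (n - hi).toNat false

-- ===== PRECONDITION & SPEC =====
def Spec_get_cache_schedule_py (num_inference_steps : Int) (height : Int) (out : List Bool) : Prop := out = get_cache_schedule_py_alt num_inference_steps height
instance (num_inference_steps : Int) (height : Int) (out : List Bool) : Decidable (Spec_get_cache_schedule_py num_inference_steps height out) := by unfold Spec_get_cache_schedule_py; infer_instance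

-- ===== CLAIM (what is proved, stated in full; the proofs are below) =====
def Claim_equal_get_cache_schedule_py : Prop := ∀ (num_inference_steps : Int) (height : Int), Dom_get_cache_schedule_py num_inference_steps height → Spec_get_cache_schedule_py num_inference_steps height (get_cache_schedule_py num_inference_steps height)

-- ===== LEMMAS AND PROOFS =====

-- The per-step predicate A computes from step 1 on.
def pvF (start e s : Int) : Bool :=
  decide (start ≤ s) && decide (s < e) && decide (PySem.Int.mod (s - start) 5 ≠ 0)

-- Once A's flag is true it stays true, and the loop computes exactly pvF at each index.
theorem pvLoopA_true (start e : Int) (l : List Int) :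
    pvLoopA start e 5 l true = l.map (pvF start e) := by
  induction l with
  | nil => rfl
  | cons s rest ih =>
    simp only [pvLoopA, pvF, List.map_cons, Bool.true_and]
    rw [ite_self, ih]

-- Step 0 is never a cache step when 0 ≤ start.
theorem pv_f0_false (start e : Int) (h : 0 ≤ start) : pvF start e 0 = false := by
  unfold pvF
  rcases lt_or_eq_of_le h with hlt | heq
  · have : ¬ (start ≤ (0:Int)) := by omega
    simp [this]
  · subst heq
    simp [PySem.Int.mod]

-- A's flag loop = map pvF over the whole range.
theorem pvA_eq_map (n e : Int) :
    pvLoopA (n.tdiv 3) e 5 (PySem.List.pyRange 0 n 1) false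
      = (PySem.List.pyRange 0 n 1).map (pvF (n.tdiv 3) e) := by
  by_cases hn : 0 < n
  · have hs : (0:Int) ≤ n.tdiv 3 := Int.tdiv_nonneg (by omega) (by norm_num)
    rw [PySem.List.pyRange_one_cons hn]
    simp only [pvLoopA, Bool.false_and, List.map_cons, if_neg (Bool.false_ne_true)]
    rw [pvLoopA_true, pv_f0_false _ _ hs]
  · rw [PySem.List.pyRange_one_eq_nil (by omega)]
    rfl

-- map pvF over a range of all-false steps is a replicate.
theorem pv_map_false (a b start e : Int) (h : ∀ s, a ≤ s → s < b → pvF start e s = false) :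
    (PySem.List.pyRange a b 1).map (pvF start e) = List.replicate (b - a).toNat false := by
  rw [List.map_congr_left (g := fun _ => false)
        (fun s hs => h s (PySem.List.mem_pyRange_one.mp hs).1 (PySem.List.mem_pyRange_one.mp hs).2)]
  rw [List.map_const']
  rw [PySem.List.length_pyRange_one]

-- The cache window [s, hi): B's block loop equals map pvF, provided the window is
-- aligned (5 ∣ s - start) and contained in [start, e).
theorem pv_mid (start e hi : Int) (hhe : hi ≤ e) :
    ∀ k : Nat, ∀ s : Int, (hi - s).toNat = k → start ≤ s → (5:Int) ∣ (s - start) →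
      (PySem.List.pyRange s hi 1).map (pvF start e) = pvMidB hi s := by
  intro k
  induction k using Nat.strong_induction_on with
  | _ k ih =>
    intro s hk hss hdvd
    by_cases hlt : s < hi
    · rw [pvMidB, dif_pos hlt]
      have hrun0 : (0:Int) ≤ min 4 (hi - s - 1) := by omega
      set run : Int := min 4 (hi - s - 1) with hrun
      have hble : s + 1 + run ≤ hi := by omega
      rw [PySem.List.pyRange_one_append s (s + 1 + run) hi (by omega) hble, List.map_append]
      have hfirst : (PySem.List.pyRange s (s + 1 + run) 1).map (pvF start e)
          = false :: List.replicate run.toNat true := by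
        rw [PySem.List.pyRange_one_cons (by omega)]
        simp only [List.map_cons]
        have hf : pvF start e s = false := by
          unfold pvF
          simp
          exact fun _ _ => hdvd
        rw [hf]
        congr 1
        have htrue : ∀ t, s + 1 ≤ t → t < s + 1 + run → pvF start e t = true := by
          intro t h1 h2
          unfold pvF
          have h3 : start ≤ t := by omega
          have h4 : t < e := by omega
          have h5 : ¬ (5:Int) ∣ (t - start) := by
            intro hd
            have hts : (5:Int) ∣ (t - s) := by
              have := Int.dvd_sub hd hdvd
              simpa [sub_sub_sub_cancel_right] using this
            omega
          have h6 : PySem.Int.mod (t - start) 5 ≠ 0 := by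
            rw [Ne, PySem.Int.mod_eq_zero_iff_dvd]
            exact h5
          simp [h3, h4]
          exact h5
        rw [List.map_congr_left (g := fun _ => true)
              (fun t ht => htrue t (PySem.List.mem_pyRange_one.mp ht).1 (PySem.List.mem_pyRange_one.mp ht).2)]
        rw [List.map_const']
        rw [PySem.List.length_pyRange_one]
        congr 1
        omega
      rw [hfirst]
      rw [List.cons_append]
      congr 2
      by_cases hr4 : run = 4
      · exact ih (hi - (s + 1 + run)).toNat (by omega) (s + 1 + run) rfl (by omega)
          (by rw [hr4]; have h9 : s + 1 + 4 - start = (s - start) + 5 := by ring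
              rw [h9]; exact Int.dvd_add hdvd ⟨1, by ring⟩)
      · have hend : s + 1 + run = hi := by omega
        rw [hend, PySem.List.pyRange_one_eq_nil (le_refl hi), pvMidB, dif_neg (lt_irrefl hi)]
        rfl
    · rw [PySem.List.pyRange_one_eq_nil (by omega), pvMidB, dif_neg hlt]
      rfl

-- map pvF over the whole range equals B's segmented output (start = n.tdiv 3, any e).
theorem pv_map_eq_alt (n e : Int) :
    (PySem.List.pyRange 0 n 1).map (pvF (n.tdiv 3) e)
      = List.replicate (max 0 (min (n.tdiv 3) n)).toNat false
        ++ pvMidB (max (max 0 (min (n.tdiv 3) n)) (min e n)) (max 0 (min (n.tdiv 3) n))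
        ++ List.replicate (n - max (max 0 (min (n.tdiv 3) n)) (min e n)).toNat false := by
  set start := n.tdiv 3 with hstart
  set lo := max 0 (min start n) with hlo
  set hi := max lo (min e n) with hhi
  by_cases hn : 0 ≤ n
  · have hs0 : 0 ≤ start := Int.tdiv_nonneg hn (by norm_num)
    have hsn : start ≤ n := Int.tdiv_le_self 3 hn
    have hlos : lo = start := by omega
    have h0lo : (0:Int) ≤ lo := by omega
    have hlohi : lo ≤ hi := by omega
    have hhin : hi ≤ n := by omega
    rw [PySem.List.pyRange_one_append 0 lo n h0lo (by omega), List.map_append,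
        PySem.List.pyRange_one_append lo hi n hlohi hhin, List.map_append]
    have p1 : (PySem.List.pyRange 0 lo 1).map (pvF start e)
        = List.replicate lo.toNat false := by
      have := pv_map_false 0 lo start e (fun s h1 h2 => by
        unfold pvF
        have : ¬ start ≤ s := by omega
        simp [this])
      simpa using this
    have p3 : (PySem.List.pyRange hi n 1).map (pvF start e)
        = List.replicate (n - hi).toNat false := by
      by_cases hen : e ≤ n
      · exact pv_map_false hi n start e (fun s h1 h2 => by
          unfold pvF
          have : ¬ s < e := by omega
          simp [this])
      · have hh : hi = n := by omega
        rw [hh, PySem.List.pyRange_one_eq_nil (le_refl n)]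
        simp
    have p2 : (PySem.List.pyRange lo hi 1).map (pvF start e) = pvMidB hi lo := by
      by_cases hmid : lo < hi
      · have hhe : hi ≤ e := by omega
        exact pv_mid start e hi hhe (hi - lo).toNat lo rfl (by omega)
          (by rw [hlos]; simp)
      · rw [PySem.List.pyRange_one_eq_nil (by omega), pvMidB, dif_neg hmid]
        rfl
    rw [p1, p2, p3, List.append_assoc]
  · have hsn : start ≤ 0 := by
      have h1 : (0:Int) ≤ (-n).tdiv 3 := Int.tdiv_nonneg (by omega) (by norm_num)
      rw [Int.neg_tdiv] at h1
      omega
    have hlo0 : lo = 0 := by omega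
    have hhi0 : hi = 0 := by omega
    rw [PySem.List.pyRange_one_eq_nil (by omega), hlo0, hhi0,
        pvMidB, dif_neg (lt_irrefl (0:Int))]
    simp
    omega

theorem pv09_eq (n : Int) : pyIntMul09A n = pyIntMul09B n := rfl

-- ===== VERDICT (by name: the statement is the Claim_ definition above) =====
theorem get_cache_schedule_py_spec : Claim_equal_get_cache_schedule_py := by
  intro n h _
  unfold Spec_get_cache_schedule_py get_cache_schedule_py get_cache_schedule_py_alt
  by_cases hh : h ≥ 720
  · simp only [if_pos hh]
    rw [pvA_eq_map, pv09_eq]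
    exact pv_map_eq_alt n (pyIntMul09B n)
  · simp only [if_neg hh]
    rw [pvA_eq_map]
    exact pv_map_eq_alt n (n - 2)
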